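-- pv_equiv track=rewrite | github.com/Organized1313Chaos/Journal | Interview/Leetcode/Contest/Mar/12/q3_beautifulSubarrays.py | beautifulSubarrays
-- ===== SOURCE A (Python) =====
-- def beautifulSubarrays(nums: list[int]) -> int:
--     res = 0
--     n = len(nums)
--     pre_xor = [0] * (n+1)
--     pre_xor[0]=0
--     cnt = [0]*(1<<20)
--     cnt[0] = 1
--     for i in range(1,n+1):
--         pre_xor[i] = pre_xor[i-1] ^ nums[i-1]
--         res += cnt[pre_xor[i]]
--         cnt[pre_xor[i]] += 1
--
--     return res
-- ===== SOURCE B (Python) =====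
-- def beautifulSubarrays(nums: list[int]) -> int:
--     # Sort the prefix-xor values: equal values become adjacent runs, and each
--     # element equal to its predecessor closes `run` new zero-xor subarrays.
--     ps = [0]
--     a = 0
--     for x in nums:
--         a ^= x
--         ps.append(a)
--     ps.sort()
--     res = 0
--     run = 0
--     prev = ps[0]
--     for p in ps[1:]:
--         if p == prev:
--             run += 1
--             res += run
--         else:
--             run = 0
--         prev = p
--     return res
-- ===== Notes on version B (the rewrite author's own statement) =====
-- stated objective: alternative
-- what changed: A interleaves 'res += cnt[x]; cnt[x] += 1' over a fixed 2^20-entry table indexed by the running prefix xor; B never counts into a table at all: it collects all prefix-xor values, SORTS them so equal values become adjacent runs, and counts pairs by a run-length scan over the sorted list, keyed by the exact (possibly negative) value instead of A's wrapped array index.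
-- intended difference: On inputs whose prefix-xor sequence contains both a negative value p and p + 2^20 (all elements within [-2^20, 2^20) so A returns), A's negative index wraps around its 2^20 table and conflates the two distinct prefix values, overcounting (A returns 1 on [-1, -1048576]); B compares the exact values and returns the true zero-xor subarray count (0 there), which is the intended answer. — e.g. on beautifulSubarrays([-1, -1048576]): A returns 1, B returns 0
import Mathlib
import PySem

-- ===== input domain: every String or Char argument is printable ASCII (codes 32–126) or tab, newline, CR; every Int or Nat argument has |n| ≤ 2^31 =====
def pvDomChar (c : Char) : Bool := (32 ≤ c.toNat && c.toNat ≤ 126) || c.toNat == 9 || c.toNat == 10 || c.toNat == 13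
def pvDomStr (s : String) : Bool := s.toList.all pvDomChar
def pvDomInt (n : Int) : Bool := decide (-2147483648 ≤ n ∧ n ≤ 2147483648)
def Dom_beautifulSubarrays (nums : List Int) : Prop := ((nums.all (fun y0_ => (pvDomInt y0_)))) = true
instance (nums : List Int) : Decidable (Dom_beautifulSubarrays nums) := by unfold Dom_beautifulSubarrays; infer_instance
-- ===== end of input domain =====

-- B replaces A's interleaved count-then-bump loop over a fixed 2^20-entry table by a
-- sort-then-run-scan: it collects all prefix-xor values, sorts them so equal values become
-- adjacent, and counts pairs by a run-length scan; equality is claimed outside D_ (A's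
-- wrapped negative indexing), see D_ below.

-- ===== PORT A =====
def beautifulSubarrays (nums : List Int) : Int :=
  let res : Int := 0
  let n : Nat := nums.length
  let pre_xor : List Int := List.replicate (n + 1) 0
  let pre_xor : List Int := PySem.List.pySetD pre_xor 0 0
  let cnt : List Int := List.replicate (1 <<< 20) 0
  let cnt : List Int := PySem.List.pySetD cnt 0 1
  let fin := (PySem.List.pyRange 1 ((n : Int) + 1)).foldl
    (fun (st : List Int × List Int × Int) i =>
      let px := PySem.List.pySetD st.1 i
        (PySem.Int.bxor (PySem.List.pyGetD st.1 (i - 1) 0) (PySem.List.pyGetD nums (i - 1) 0))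
      let r := st.2.2 + PySem.List.pyGetD st.2.1 (PySem.List.pyGetD px i 0) 0
      let c := PySem.List.pySetD st.2.1 (PySem.List.pyGetD px i 0)
        (PySem.List.pyGetD st.2.1 (PySem.List.pyGetD px i 0) 0 + 1)
      (px, c, r))
    (pre_xor, cnt, res)
  fin.2.2

-- ===== PORT B =====
def beautifulSubarrays_alt (nums : List Int) : Int :=
  let built := nums.foldl
    (fun (st : List Int × Int) x =>
      let a := PySem.Int.bxor st.2 x
      (st.1 ++ [a], a))
    (([0] : List Int), (0 : Int))
  let ps : List Int := PySem.List.sorted built.1 (fun v => v) false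
  -- ps[0]: ps is never empty (it always holds the initial prefix 0), so the default is never used
  let fin := (PySem.List.slice ps (some 1) none).foldl
    (fun (st : Int × Int × Int) p =>
      if p = st.1 then (p, st.2.1 + 1, st.2.2 + (st.2.1 + 1))
      else (p, 0, st.2.2))
    (PySem.List.pyGetD ps 0 0, (0 : Int), (0 : Int))
  fin.2.2

-- ===== PRECONDITION & SPEC =====
-- Pre_ admits exactly the inputs on which A returns: every element fits the signed 21-bit
-- range [-2^20, 2^20); on any other input A's table indexing raises IndexError.
def Pre_beautifulSubarrays (nums : List Int) : Prop :=
  ∀ x ∈ nums, -1048576 ≤ x ∧ x < 1048576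
instance (nums : List Int) : Decidable (Pre_beautifulSubarrays nums) := by
  unfold Pre_beautifulSubarrays; infer_instance
def pvWitness_beautifulSubarrays : List Int := [1, 2, -3]

-- the prefix-xor sequence of the input (0, then each running xor), used to state D_
def pvPX (a : Int) : List Int → List Int
  | [] => [a]
  | x :: xs => a :: pvPX (PySem.Int.bxor a x) xs

-- On inputs whose prefix-xor sequence contains both a negative value p and p + 2^20, A's
-- negative index wraps around its 2^20-entry table and conflates the two distinct prefix
-- values, overcounting; B compares the exact values and returns the true zero-xor subarray
-- count, which is the intended answer.
def D_beautifulSubarrays (nums : List Int) : Prop :=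
  ∃ p ∈ pvPX 0 nums, p < 0 ∧ (p + 1048576) ∈ pvPX 0 nums
instance (nums : List Int) : Decidable (D_beautifulSubarrays nums) := by
  unfold D_beautifulSubarrays; infer_instance

def Spec_beautifulSubarrays (nums : List Int) (out : Int) : Prop :=
  ¬ D_beautifulSubarrays nums → out = beautifulSubarrays_alt nums
instance (nums : List Int) (out : Int) : Decidable (Spec_beautifulSubarrays nums out) := by
  unfold Spec_beautifulSubarrays; infer_instance

def pvDiffWitness_beautifulSubarrays : List Int := [-1, -1048576]
def pvDiffWitnessOut_beautifulSubarrays : Int × Int := (1, 0)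

-- ===== CLAIM (what is proved, stated in full; the proofs are below) =====
def Claim_unchanged_beautifulSubarrays : Prop := ∀ (nums : List Int), Dom_beautifulSubarrays nums → Pre_beautifulSubarrays nums → Spec_beautifulSubarrays nums (beautifulSubarrays nums)
def Claim_changed_beautifulSubarrays : Prop := Dom_beautifulSubarrays (pvDiffWitness_beautifulSubarrays) ∧ Pre_beautifulSubarrays (pvDiffWitness_beautifulSubarrays) ∧ D_beautifulSubarrays (pvDiffWitness_beautifulSubarrays) ∧ beautifulSubarrays (pvDiffWitness_beautifulSubarrays) = pvDiffWitnessOut_beautifulSubarrays.1 ∧ beautifulSubarrays_alt (pvDiffWitness_beautifulSubarrays) = pvDiffWitnessOut_beautifulSubarrays.2 ∧ pvDiffWitnessOut_beautifulSubarrays.1 ≠ pvDiffWitnessOut_beautifulSubarrays.2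
def Claim_exact_beautifulSubarrays : Prop := ∀ (nums : List Int), Dom_beautifulSubarrays nums → Pre_beautifulSubarrays nums → D_beautifulSubarrays nums → beautifulSubarrays nums ≠ beautifulSubarrays_alt nums

-- ===== LEMMAS AND PROOFS =====

def InR (v : Int) : Prop := -1048576 ≤ v ∧ v < 1048576

-- the bucket A's table actually addresses for an in-range value v (negative indexes wrap)
def bkt (v : Int) : Int := if v < 0 then v + 1048576 else v

-- number of unordered equal pairs in a list
def eqPairs : List Int → Int
  | [] => 0
  | x :: xs => (xs.count x : Int) + eqPairs xs

-- the contents of A's table after the prefixes of l have been tallied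
def mkCnt (l : List Int) : List Int :=
  (List.range (1 <<< 20)).map fun (j : Nat) => ((l.map bkt).count ((j : Int)) : Int)

lemma bxor_inR {a b : Int} (ha : InR a) (hb : InR b) : InR (PySem.Int.bxor a b) := by
  obtain ⟨ha1, ha2⟩ := ha; obtain ⟨hb1, hb2⟩ := hb
  unfold PySem.Int.bxor
  split_ifs with h1 h2 h3
  · have hx : a.toNat ^^^ b.toNat < 2 ^ 20 :=
      Nat.xor_lt_two_pow (by omega) (by omega)
    constructor <;> omega
  · have hx : a.toNat ^^^ (-b - 1).toNat < 2 ^ 20 :=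
      Nat.xor_lt_two_pow (by omega) (by omega)
    constructor <;> omega
  · have hx : (-a - 1).toNat ^^^ b.toNat < 2 ^ 20 :=
      Nat.xor_lt_two_pow (by omega) (by omega)
    constructor <;> omega
  · have hx : (-a - 1).toNat ^^^ (-b - 1).toNat < 2 ^ 20 :=
      Nat.xor_lt_two_pow (by omega) (by omega)
    constructor <;> omega

lemma pvPX_inR {a : Int} {l : List Int} (ha : InR a) (hl : ∀ x ∈ l, InR x) :
    ∀ p ∈ pvPX a l, InR p := by
  induction l generalizing a with
  | nil => intro p hp; simp [pvPX] at hp; subst hp; exact ha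
  | cons x xs ih =>
    intro p hp
    simp only [pvPX, List.mem_cons] at hp
    rcases hp with rfl | hp
    · exact ha
    · exact ih (bxor_inR ha (hl x (by simp))) (fun y hy => hl y (by simp [hy])) p hp

lemma pvPX_getElem!_succ (a : Int) (l : List Int) (k : Nat) (hk : k < l.length) :
    (pvPX a l)[k + 1]! = PySem.Int.bxor ((pvPX a l)[k]!) (l[k]!) := by
  induction l generalizing a k with
  | nil => simp at hk
  | cons x xs ih =>
    cases k with
    | zero => simp [pvPX]; cases xs <;> rfl
    | succ k =>
      simp only [pvPX]
      have h1 : k < xs.length := by simpa using hk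
      simpa using ih (PySem.Int.bxor a x) k h1

lemma length_pvPX (a : Int) (l : List Int) : (pvPX a l).length = l.length + 1 := by
  induction l generalizing a with
  | nil => rfl
  | cons x xs ih => simp [pvPX, ih]

lemma pvPX_head_tail (a : Int) (l : List Int) : pvPX a l = a :: (pvPX a l).tail := by
  cases l <;> rfl

lemma eqPairs_append (m : List Int) (y : Int) :
    eqPairs (m ++ [y]) = eqPairs m + (m.count y : Int) := by
  induction m with
  | nil => simp [eqPairs]
  | cons x xs ih =>
    simp only [List.cons_append, eqPairs, ih, List.count_append, List.count_singleton]
    by_cases h : y = x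
    · simp [h]; push_cast; ring
    · simp [h, Ne.symm h]; ring

lemma bkt_nonneg {v : Int} (hv : InR v) : 0 ≤ bkt v := by unfold bkt; unfold InR at hv; split <;> omega
lemma bkt_lt {v : Int} (hv : InR v) : bkt v < 1048576 := by unfold bkt; unfold InR at hv; split <;> omega

lemma pyGetD_inR (xs : List Int) (hL : xs.length = 1048576) {v : Int} (hv : InR v) (d : Int) :
    PySem.List.pyGetD xs v d = xs[(bkt v).toNat]! := by
  obtain ⟨h1, h2⟩ := hv
  simp only [PySem.List.pyGetD, PySem.List.pyGet?, PySem.List.pyIdx?, hL, bkt]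
  split_ifs with h3 h4 h5 <;> try omega
  · rw [Option.bind_some, List.getElem?_eq_getElem (by omega),
      getElem!_pos xs v.toNat (by omega)]
    rfl
  · rw [Option.bind_some]
    have he : 1048576 - (-v).toNat = (v + 1048576).toNat := by omega
    rw [he, List.getElem?_eq_getElem (by omega),
      getElem!_pos xs (v + 1048576).toNat (by omega)]
    rfl

lemma pySetD_inR (xs : List Int) (hL : xs.length = 1048576) {v : Int} (hv : InR v) (w : Int) :
    PySem.List.pySetD xs v w = xs.set (bkt v).toNat w := by
  obtain ⟨h1, h2⟩ := hv
  simp only [PySem.List.pySetD, PySem.List.pySet?, PySem.List.pyIdx?, hL, bkt]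
  split_ifs with h3 h4 h5 <;> try omega
  · rfl
  · have he : 1048576 - (-v).toNat = (v + 1048576).toNat := by omega
    rw [he]; rfl

lemma length_mkCnt (l : List Int) : (mkCnt l).length = 1048576 := by
  simp only [mkCnt, List.length_map, List.length_range]
  decide

lemma mkCnt_get (l : List Int) (j : Nat) (hj : j < 1048576) :
    (mkCnt l)[j]! = ((l.map bkt).count (j : Int) : Int) := by
  rw [getElem!_pos (mkCnt l) j (by rw [length_mkCnt]; omega)]
  simp only [mkCnt, List.getElem_map, List.getElem_range]

lemma mkCnt_read (l : List Int) {v : Int} (hv : InR v) :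
    PySem.List.pyGetD (mkCnt l) v 0 = ((l.map bkt).count (bkt v) : Int) := by
  rw [pyGetD_inR (mkCnt l) (length_mkCnt l) hv, mkCnt_get]
  · congr 1
    rw [Int.toNat_of_nonneg (bkt_nonneg hv)]
  · have := bkt_nonneg hv; have := bkt_lt hv; omega

lemma mkCnt_set (l : List Int) {v : Int} (hv : InR v) :
    PySem.List.pySetD (mkCnt l) v (((l.map bkt).count (bkt v) : Int) + 1) = mkCnt (l ++ [v]) := by
  rw [pySetD_inR (mkCnt l) (length_mkCnt l) hv]
  have hb0 := bkt_nonneg hv; have hb1 := bkt_lt hv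
  apply List.ext_getElem
  · simp only [List.length_set, length_mkCnt, mkCnt, List.length_map, List.length_range]
  intro j h1 h2
  have hj : j < 1048576 := by simpa [length_mkCnt] using h2
  rw [List.getElem_set]
  simp only [mkCnt, List.getElem_map, List.getElem_range, List.map_append, List.map_cons,
    List.map_nil, List.count_append]
  split_ifs with hjb
  · have hji : (j : Int) = bkt v := by omega
    rw [hji]
    simp
  · have hji : (j : Int) ≠ bkt v := by omega
    simp [hji, Ne.symm hji]

lemma pyGetD_nonneg_getElem! (xs : List Int) (k : Nat) (hk : k < xs.length) (d : Int) :
    PySem.List.pyGetD xs (k : Int) d = xs[k]! := by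
  simp only [PySem.List.pyGetD, PySem.List.pyGet?, PySem.List.pyIdx?]
  rw [if_pos (by omega), if_pos (by exact_mod_cast hk), Option.bind_some]
  rw [Int.toNat_natCast, List.getElem?_eq_getElem hk, getElem!_pos xs k hk]
  rfl

def stepBody (nums : List Int) (st : List Int × List Int × Int) (i : Int) :
    List Int × List Int × Int :=
  let px := PySem.List.pySetD st.1 i
    (PySem.Int.bxor (PySem.List.pyGetD st.1 (i - 1) 0) (PySem.List.pyGetD nums (i - 1) 0))
  let r := st.2.2 + PySem.List.pyGetD st.2.1 (PySem.List.pyGetD px i 0) 0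
  let c := PySem.List.pySetD st.2.1 (PySem.List.pyGetD px i 0)
    (PySem.List.pyGetD st.2.1 (PySem.List.pyGetD px i 0) 0 + 1)
  (px, c, r)

lemma loopA (nums : List Int) (hpre : ∀ x ∈ nums, InR x) :
    ∀ k, k ≤ nums.length →
    ((PySem.List.pyRange 1 ((k : Int) + 1)).foldl (stepBody nums)
      (PySem.List.pySetD (List.replicate (nums.length + 1) (0:Int)) 0 0,
       PySem.List.pySetD (List.replicate (1 <<< 20) (0:Int)) 0 1, (0:Int)))
    = ((pvPX 0 nums).take (k+1) ++ List.replicate (nums.length - k) 0,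
       mkCnt ((pvPX 0 nums).take (k+1)),
       eqPairs (((pvPX 0 nums).take (k+1)).map bkt)) := by
  have hPlen : (pvPX 0 nums).length = nums.length + 1 := length_pvPX 0 nums
  have hPin : ∀ p ∈ pvPX 0 nums, InR p :=
    pvPX_inR (by constructor <;> norm_num) hpre
  intro k hk
  induction k with
  | zero =>
    have h0 : PySem.List.pyRange 1 (((0:Nat) : Int) + 1) = [] := by decide
    rw [h0, List.foldl_nil]
    have e1 : PySem.List.pySetD (List.replicate (nums.length + 1) (0:Int)) 0 0
        = (pvPX 0 nums).take (0+1) ++ List.replicate (nums.length - 0) 0 := by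
      rw [PySem.List.pySetD_of_nonneg _ _ (by norm_num)]
      conv_rhs => rw [pvPX_head_tail 0 nums]
      simp [List.replicate_succ]
    have e2 : PySem.List.pySetD (List.replicate (1 <<< 20) (0:Int)) 0 1
        = mkCnt ((pvPX 0 nums).take (0+1)) := by
      conv_rhs => rw [pvPX_head_tail 0 nums]
      rw [PySem.List.pySetD_of_nonneg _ _ (by norm_num)]
      simp only [List.take_succ_cons, List.take_zero]
      apply List.ext_getElem
      · simp only [List.length_set, List.length_replicate, length_mkCnt]
        norm_num [Nat.shiftLeft_eq]
      intro j h1 h2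
      have hj : j < 1048576 := by
        simp only [List.length_set, List.length_replicate] at h1; omega
      simp only [Int.toNat_zero, List.getElem_set, mkCnt, List.getElem_map,
        List.getElem_range, List.getElem_replicate]
      have hb : bkt 0 = 0 := rfl
      simp only [List.map_cons, List.map_nil, hb]
      split_ifs with h
      · subst h; simp
      · have hne : (j : Int) ≠ 0 := by omega
        simp [hne, Ne.symm hne]
    have e3 : (0 : Int) = eqPairs (((pvPX 0 nums).take (0+1)).map bkt) := by
      conv_rhs => rw [pvPX_head_tail 0 nums]
      simp only [List.take_succ_cons, List.take_zero, List.map_cons, List.map_nil]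
      show (0:Int) = eqPairs [bkt 0]
      decide
    simp only [Prod.mk.injEq]
    exact ⟨e1, e2, e3⟩
  | succ k ih =>
    have hk1 : k < nums.length := by omega
    have hPk1 : k + 1 < (pvPX 0 nums).length := by omega
    have hcast : (((k+1:Nat)) : Int) + 1 = ((k : Int) + 1) + 1 := by push_cast; ring
    rw [hcast, PySem.List.pyRange_one_succ_right (by omega), List.foldl_append, ih (by omega)]
    simp only [List.foldl_cons, List.foldl_nil]
    have hlenA : ((pvPX 0 nums).take (k+1) ++ List.replicate (nums.length - k) (0:Int)).length
        = nums.length + 1 := by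
      simp only [List.length_append, List.length_take, List.length_replicate, hPlen]; omega
    have hInRP : InR ((pvPX 0 nums)[k+1]!) := by
      apply hPin
      rw [getElem!_pos _ (k+1) hPk1]
      exact List.getElem_mem _
    have htake : (pvPX 0 nums).take (k+2) = (pvPX 0 nums).take (k+1) ++ [(pvPX 0 nums)[k+1]!] := by
      rw [List.take_add_one, List.getElem?_eq_getElem hPk1, getElem!_pos _ (k+1) hPk1]
      rfl
    have hidx : ((k : Int) + 1 - 1) = (k : Int) := by ring
    have r1 : PySem.List.pyGetD ((pvPX 0 nums).take (k+1) ++ List.replicate (nums.length - k) (0:Int)) ((k : Int)) 0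
        = (pvPX 0 nums)[k]! := by
      rw [pyGetD_nonneg_getElem! _ k (by omega)]
      rw [List.getElem!_eq_getElem?_getD,
        List.getElem?_append_left (by simp only [List.length_take, hPlen]; omega),
        List.getElem?_take, if_pos (by omega), ← List.getElem!_eq_getElem?_getD]
    have r2 : PySem.List.pyGetD nums ((k : Int)) 0 = nums[k]! :=
      pyGetD_nonneg_getElem! nums k hk1 0
    have hval : PySem.Int.bxor ((pvPX 0 nums)[k]!) (nums[k]!) = (pvPX 0 nums)[k+1]! :=
      (pvPX_getElem!_succ 0 nums k hk1).symm
    have hrep : List.replicate (nums.length - k) (0:Int)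
        = 0 :: List.replicate (nums.length - (k+1)) 0 := by
      rw [← List.replicate_succ]; congr 1; omega
    have r3 : PySem.List.pySetD ((pvPX 0 nums).take (k+1) ++ List.replicate (nums.length - k) (0:Int)) ((k : Int)+1) ((pvPX 0 nums)[k+1]!)
        = (pvPX 0 nums).take (k+2) ++ List.replicate (nums.length - (k+1)) 0 := by
      rw [PySem.List.pySetD_of_nonneg _ _ (by omega)]
      have ht : ((k:Int)+1).toNat = k+1 := by omega
      rw [ht, List.set_append, if_neg (by simp only [List.length_take, hPlen]; omega)]
      have h0 : k + 1 - ((pvPX 0 nums).take (k+1)).length = 0 := by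
        simp only [List.length_take, hPlen]; omega
      rw [h0, hrep, htake]
      simp [List.set]
    have r4 : PySem.List.pyGetD ((pvPX 0 nums).take (k+2) ++ List.replicate (nums.length - (k+1)) (0:Int)) ((k : Int)+1) 0
        = (pvPX 0 nums)[k+1]! := by
      have : ((k:Int)+1) = ((k+1 : Nat) : Int) := by push_cast; ring
      rw [this, pyGetD_nonneg_getElem! _ (k+1)
        (by simp only [List.length_append, List.length_take, List.length_replicate, hPlen]; omega)]
      rw [List.getElem!_eq_getElem?_getD,
        List.getElem?_append_left (by simp only [List.length_take, hPlen]; omega),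
        List.getElem?_take, if_pos (by omega), ← List.getElem!_eq_getElem?_getD]
    have r5 : PySem.List.pyGetD (mkCnt ((pvPX 0 nums).take (k+1))) ((pvPX 0 nums)[k+1]!) 0
        = ((((pvPX 0 nums).take (k+1)).map bkt).count (bkt ((pvPX 0 nums)[k+1]!)) : Int) :=
      mkCnt_read _ hInRP
    have r6 : eqPairs (((pvPX 0 nums).take (k+1)).map bkt)
          + ((((pvPX 0 nums).take (k+1)).map bkt).count (bkt ((pvPX 0 nums)[k+1]!)) : Int)
        = eqPairs (((pvPX 0 nums).take (k+2)).map bkt) := by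
      rw [htake, List.map_append, List.map_singleton, eqPairs_append]
    have r7 : PySem.List.pySetD (mkCnt ((pvPX 0 nums).take (k+1))) ((pvPX 0 nums)[k+1]!)
          (((((pvPX 0 nums).take (k+1)).map bkt).count (bkt ((pvPX 0 nums)[k+1]!)) : Int) + 1)
        = mkCnt ((pvPX 0 nums).take (k+2)) := by
      rw [mkCnt_set _ hInRP, ← htake]
    simp only [stepBody, hidx, r1, r2, hval, r3, r4, r5, r6, r7]

-- B-side: the prefix-building fold produces pvPX
lemma buildPs (l : List Int) : ∀ (acc : List Int) (a : Int),
    (l.foldl (fun (st : List Int × Int) x =>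
      (st.1 ++ [PySem.Int.bxor st.2 x], PySem.Int.bxor st.2 x)) (acc ++ [a], a)).1
    = acc ++ pvPX a l := by
  induction l with
  | nil => intro acc a; simp [pvPX]
  | cons x xs ih =>
    intro acc a
    simp only [List.foldl_cons]
    rw [List.append_assoc acc [a] [PySem.Int.bxor a x]] at *
    have := ih (acc ++ [a]) (PySem.Int.bxor a x)
    simp only [List.append_assoc] at this ⊢
    rw [this]
    simp [pvPX]

-- B-side: the run-length scan over a (≤)-sorted list counts equal pairs
lemma scanRuns (l : List Int) : ∀ (p r s : Int), ((p :: l).Pairwise (· ≤ ·)) →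
    (l.foldl (fun (st : Int × Int × Int) x =>
      if x = st.1 then (x, st.2.1 + 1, st.2.2 + (st.2.1 + 1))
      else (x, 0, st.2.2)) (p, r, s)).2.2
    = s + eqPairs (p :: l) + r * (l.count p : Int) := by
  induction l with
  | nil => intro p r s _; simp [eqPairs]
  | cons x xs ih =>
    intro p r s hsorted
    have hpx : p ≤ x := (List.pairwise_cons.1 hsorted).1 x (by simp)
    have hxs : (x :: xs).Pairwise (· ≤ ·) := (List.pairwise_cons.1 hsorted).2
    simp only [List.foldl_cons]
    by_cases hx : x = p
    · subst hx
      rw [if_pos rfl, ih x (r + 1) (s + (r + 1)) hxs]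
      simp only [eqPairs, List.count_cons_self, List.count_cons]
      push_cast
      ring
    · rw [if_neg hx, ih x 0 s hxs]
      have hplt : ∀ y ∈ x :: xs, p < y := by
        intro y hy
        rcases List.mem_cons.1 hy with rfl | hy'
        · exact lt_of_le_of_ne hpx (fun h => hx h.symm)
        · have hxy : x ≤ y := (List.pairwise_cons.1 hxs).1 y hy'
          exact lt_of_lt_of_le (lt_of_le_of_ne hpx (fun h => hx h.symm)) hxy
      have hcnt : (x :: xs).count p = 0 :=
        List.count_eq_zero.2 (fun hmem => lt_irrefl p (hplt p hmem))
      simp only [eqPairs]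
      rw [hcnt]
      push_cast
      ring

-- eqPairs is invariant under permutation
lemma eqPairs_perm {l₁ l₂ : List Int} (h : l₁.Perm l₂) : eqPairs l₁ = eqPairs l₂ := by
  induction h with
  | nil => rfl
  | cons x h ih => simp only [eqPairs, ih, h.count_eq]
  | swap x y l =>
    simp only [eqPairs, List.count_cons]
    by_cases hxy : x = y <;> simp [hxy, Ne.symm] <;> ring
  | trans _ _ ih1 ih2 => rw [ih1, ih2]

-- delta-free injectivity transfer lemmas for the tight theorem
lemma count_map_inj (f : Int → Int) (x : Int) (xs : List Int)
    (h : ∀ y ∈ xs, f y = f x → y = x) : (xs.map f).count (f x) = xs.count x := by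
  induction xs with
  | nil => simp
  | cons y ys ih =>
    simp only [List.map_cons, List.count_cons]
    rw [ih (fun z hz hfz => h z (by simp [hz]) hfz)]
    congr 1
    by_cases hyx : y = x
    · subst hyx; simp
    · have hf : f y ≠ f x := fun he => hyx (h y (by simp) he)
      simp [hyx, hf]

lemma eqPairs_map_of_inj (f : Int → Int) : ∀ l : List Int,
    (∀ u ∈ l, ∀ v ∈ l, f u = f v → u = v) → eqPairs (l.map f) = eqPairs l := by
  intro l
  induction l with
  | nil => intro _; rfl
  | cons x xs ih =>
    intro hinj
    simp only [List.map_cons, eqPairs]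
    rw [count_map_inj f x xs (fun y hy hfy => hinj y (by simp [hy]) x (by simp) hfy),
      ih (fun u hu v hv => hinj u (by simp [hu]) v (by simp [hv]))]

lemma countP_lt (p q : Int → Bool) (xs : List Int)
    (himp : ∀ y ∈ xs, q y = true → p y = true)
    (v : Int) (hv : v ∈ xs) (hpv : p v = true) (hqv : q v = false) :
    xs.countP q < xs.countP p := by
  induction xs with
  | nil => simp at hv
  | cons y ys ih =>
    have hmono : ys.countP q ≤ ys.countP p :=
      List.countP_mono_left (fun z hz => himp z (by simp [hz]))
    simp only [List.countP_cons]
    rcases List.mem_cons.1 hv with rfl | hv'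
    · simp only [hpv, hqv]
      norm_num
      omega
    · have hstrict := ih (fun z hz => himp z (by simp [hz])) hv'
      by_cases hq : q y = true
      · rw [himp y (by simp) hq, hq]
        omega
      · simp only [Bool.not_eq_true] at hq
        rw [hq]
        norm_num
        split <;> omega

lemma count_le_count_map (f : Int → Int) (x : Int) (xs : List Int) :
    xs.count x ≤ (xs.map f).count (f x) := by
  rw [List.count_eq_countP, List.count_eq_countP, List.countP_map]
  exact List.countP_mono_left (fun z hz hzx => by
    simp only [Function.comp, beq_iff_eq] at *
    simp [hzx])

lemma eqPairs_le_map (f : Int → Int) : ∀ l : List Int, eqPairs l ≤ eqPairs (l.map f) := by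
  intro l
  induction l with
  | nil => simp [eqPairs]
  | cons x xs ih =>
    simp only [List.map_cons, eqPairs]
    have := count_le_count_map f x xs
    have : (xs.count x : Int) ≤ ((xs.map f).count (f x) : Int) := by exact_mod_cast this
    omega

lemma eqPairs_lt_map (f : Int → Int) : ∀ l : List Int,
    (∃ u ∈ l, ∃ v ∈ l, u ≠ v ∧ f u = f v) → eqPairs l < eqPairs (l.map f) := by
  intro l
  induction l with
  | nil => rintro ⟨u, hu, _⟩; simp at hu
  | cons x xs ih =>
    rintro ⟨u, hu, v, hv, hne, hfe⟩
    simp only [List.map_cons, eqPairs]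
    have hle := eqPairs_le_map f xs
    have key : ∀ w ∈ xs, w ≠ x → f w = f x →
        (xs.count x : Int) + eqPairs xs < ((xs.map f).count (f x) : Int) + eqPairs (xs.map f) := by
      intro w hw hwx hfw
      have h1 : xs.countP (· == x) < xs.countP (fun y => f y == f x) := by
        apply countP_lt _ _ xs (fun y hy hyx => by
          simp only [beq_iff_eq] at *; simp [hyx]) w hw
        · simp [hfw]
        · simp [hwx]
      have hcnt : xs.count x < (xs.map f).count (f x) := by
        rw [List.count_eq_countP, List.count_eq_countP, List.countP_map]
        exact h1
      have : (xs.count x : Int) < ((xs.map f).count (f x) : Int) := by exact_mod_cast hcnt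
      omega
    rcases List.mem_cons.1 hu with rfl | hu' <;> rcases List.mem_cons.1 hv with rfl | hv'
    · exact absurd rfl hne
    · exact key v hv' (fun h => hne h.symm) hfe.symm
    · exact key u hu' hne hfe
    · have hstrict := ih ⟨u, hu', v, hv', hne, hfe⟩
      have hc := count_le_count_map f x xs
      have : (xs.count x : Int) ≤ ((xs.map f).count (f x) : Int) := by exact_mod_cast hc
      omega

-- A computes eqPairs of the bucketed prefix-xor list
lemma a_eq (nums : List Int) (hpre : Pre_beautifulSubarrays nums) :
    beautifulSubarrays nums = eqPairs ((pvPX 0 nums).map bkt) := by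
  have hpre' : ∀ x ∈ nums, InR x := hpre
  show ((PySem.List.pyRange 1 ((nums.length : Int) + 1)).foldl (stepBody nums)
      (PySem.List.pySetD (List.replicate (nums.length + 1) (0:Int)) 0 0,
       PySem.List.pySetD (List.replicate (1 <<< 20) (0:Int)) 0 1, (0:Int))).2.2 = _
  rw [loopA nums hpre' nums.length le_rfl]
  have ht : (pvPX 0 nums).take (nums.length + 1) = pvPX 0 nums := by
    rw [← length_pvPX 0 nums]
    exact List.take_length
  rw [ht]

-- B computes eqPairs of the exact prefix-xor list
lemma b_eq (nums : List Int) :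
    beautifulSubarrays_alt nums = eqPairs (pvPX 0 nums) := by
  unfold beautifulSubarrays_alt
  simp only
  have hbuild : (nums.foldl (fun (st : List Int × Int) x =>
      (st.1 ++ [PySem.Int.bxor st.2 x], PySem.Int.bxor st.2 x)) (([0] : List Int), (0 : Int))).1
      = pvPX 0 nums := by
    have := buildPs nums [] 0
    simpa using this
  rw [hbuild]
  have hperm : (PySem.List.sorted (pvPX 0 nums) (fun v => v) false).Perm (pvPX 0 nums) :=
    PySem.List.sorted_perm _ _ _
  have hpair : (PySem.List.sorted (pvPX 0 nums) (fun v => v) false).Pairwise (· ≤ ·) :=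
    PySem.List.sorted_pairwise _ _
  have hlen : (PySem.List.sorted (pvPX 0 nums) (fun v => v) false).length = nums.length + 1 := by
    rw [hperm.length_eq, length_pvPX]
  obtain ⟨h, t, hht⟩ : ∃ h t, PySem.List.sorted (pvPX 0 nums) (fun v => v) false = h :: t := by
    cases hS : PySem.List.sorted (pvPX 0 nums) (fun v => v) false with
    | nil => rw [hS] at hlen; simp at hlen
    | cons h t => exact ⟨h, t, rfl⟩
  rw [hht]
  rw [PySem.List.slice_from_one]
  have hget : PySem.List.pyGetD (h :: t) 0 0 = h := by
    have := pyGetD_nonneg_getElem! (h :: t) 0 (by simp) 0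
    simpa using this
  rw [hget]
  simp only [List.tail_cons]
  rw [scanRuns t h 0 0 (hht ▸ hpair)]
  have hEq : eqPairs (h :: t) = eqPairs (pvPX 0 nums) := by
    rw [← hht]; exact eqPairs_perm hperm
  rw [hEq]
  ring

-- ===== VERDICT (by name: the statement is the Claim_ definition above) =====
theorem beautifulSubarrays_spec : Claim_unchanged_beautifulSubarrays := by
  intro nums _ hpre hnd
  have hpre' : ∀ x ∈ nums, InR x := hpre
  have hPin : ∀ p ∈ pvPX 0 nums, InR p :=
    pvPX_inR (by constructor <;> norm_num) hpre'
  show beautifulSubarrays nums = beautifulSubarrays_alt nums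
  rw [a_eq nums hpre, b_eq nums]
  apply eqPairs_map_of_inj
  intro u hu v hv hfe
  obtain ⟨hu1, hu2⟩ := hPin u hu
  obtain ⟨hv1, hv2⟩ := hPin v hv
  by_contra hne
  apply hnd
  unfold bkt at hfe
  split_ifs at hfe with h1 h2 h3
  · omega
  · exact ⟨u, hu, h1, hfe ▸ hv⟩
  · exact ⟨v, hv, h3, hfe ▸ hu⟩
  · omega

theorem beautifulSubarrays_changed : Claim_changed_beautifulSubarrays := by
  unfold Claim_changed_beautifulSubarrays
  refine ⟨by decide, by decide, by decide, ?_, by decide, by decide⟩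
  rw [a_eq _ (by decide)]
  decide

theorem beautifulSubarrays_tight : Claim_exact_beautifulSubarrays := by
  intro nums _ hpre hd
  have hpre' : ∀ x ∈ nums, InR x := hpre
  obtain ⟨p, hp, hpneg, hp2⟩ := hd
  obtain ⟨hp1, _⟩ := pvPX_inR (a := 0) (by constructor <;> norm_num) hpre' p hp
  rw [a_eq nums hpre, b_eq nums]
  refine (ne_of_lt (eqPairs_lt_map bkt (pvPX 0 nums) ?_)).symm
  refine ⟨p + 1048576, hp2, p, hp, by omega, ?_⟩
  unfold bkt
  rw [if_neg (by omega), if_pos hpneg]
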